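-- pv_equiv track=rewrite | github.com/CambrianTech/agent-relay | lib/airc_core/humanhash.py | humanhash
-- ===== SOURCE A (Python) =====
-- DICT = (
--     "ack alabama alanine alaska alpha angel apart april arizona arkansas artist asparagus aspen august autumn avocado bacon bakerloo batman beer berlin beryllium black blossom blue bluebird bravo bulldog burger butter california carbon cardinal carolina carpet cat ceiling cello center charlie chicken coffee cola cold colorado comet connecticut crazy cup dakota december delaware delta diet don double early earth east echo edward eight eighteen eleven emma enemy equal failed fanta fillet finch fish five fix floor florida football four fourteen foxtrot freddie friend fruit gee georgia glucose golf green grey hamper happy harry hawaii helium high hot hotel hydrogen idaho illinois india indigo ink iowa island item jersey jig johnny juliet july jupiter kansas kentucky kilo king kitten lactose lake lamp lemon leopard lima lion lithium london louisiana low magazine magnesium maine mango march mars maryland massachusetts may mexico michigan mike minnesota mirror missouri mobile mockingbird monkey montana moon mountain muppet music nebraska neptune network nevada nine nineteen nitrogen north november nuts october ohio oklahoma one orange oranges oregon oscar oven oxygen papa paris pasta pennsylvania pip pizza pluto potato princess purple quebec queen quiet red river robert robin romeo rugby sad salami saturn september seven seventeen shade sierra single sink six sixteen skylark snake social sodium solar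 south spaghetti speaker spring stairway steak stream summer sweet table tango ten tennessee tennis texas thirteen three timing triple twelve twenty two uncle undress uniform uranus utah vegan venus vermont victor video violet virginia washington west whiskey white william winner winter wisconsin wolfram wyoming xray yankee yellow zebra zulu"
-- ).split()
--
-- def humanhash(hex_input: str, n_words: int = 4) -> str:
--     if not hex_input:
--         raise ValueError("empty input")
--     if n_words < 1:
--         raise ValueError("n_words must be >= 1")
--     if len(hex_input) % 2:
--         hex_input = f"0{hex_input}"
--     try:
--         data = bytes.fromhex(hex_input)
--     except ValueError as exc:
--         raise ValueError("input must be hex") from exc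
--     if not data:
--         raise ValueError("empty input")
--
--     seg_size = max(len(data) // n_words, 1)
--     words: list[str] = []
--     for seg in range(n_words):
--         start = seg * seg_size
--         end = len(data) if seg == n_words - 1 else start + seg_size
--         acc = 0
--         for value in data[start:end]:
--             acc ^= value
--         words.append(DICT[acc])
--     return "-".join(words)
-- ===== SOURCE B (Python) =====
-- DICT = (
--     "ack alabama alanine alaska alpha angel apart april arizona arkansas artist asparagus aspen august autumn avocado bacon bakerloo batman beer berlin beryllium black blossom blue bluebird bravo bulldog burger butter california carbon cardinal carolina carpet cat ceiling cello center charlie chicken coffee cola cold colorado comet connecticut crazy cup dakota december delaware delta diet don double early earth east echo edward eight eighteen eleven emma enemy equal failed fanta fillet finch fish five fix floor florida football four fourteen foxtrot freddie friend fruit gee georgia glucose golf green grey hamper happy harry hawaii helium high hot hotel hydrogen idaho illinois india indigo ink iowa island item jersey jig johnny juliet july jupiter kansas kentucky kilo king kitten lactose lake lamp lemon leopard lima lion lithium london louisiana low magazine magnesium maine mango march mars maryland massachusetts may mexico michigan mike minnesota mirror missouri mobile mockingbird monkey montana moon mountain muppet music nebraska neptune network nevada nine nineteen nitrogen north november nuts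 october ohio oklahoma one orange oranges oregon oscar oven oxygen papa paris pasta pennsylvania pip pizza pluto potato princess purple quebec queen quiet red river robert robin romeo rugby sad salami saturn september seven seventeen shade sierra single sink six sixteen skylark snake social sodium solar south spaghetti speaker spring stairway steak stream summer sweet table tango ten tennessee tennis texas thirteen three timing triple twelve twenty two uncle undress uniform uranus utah vegan venus vermont victor video violet virginia washington west whiskey white william winner winter wisconsin wolfram wyoming xray yankee yellow zebra zulu"
-- ).split()
--
--
-- def humanhash(hex_input: str, n_words: int = 4) -> str:
--     # Single forward pass: scatter each byte by XOR into its word's accumulator.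
--     if not hex_input:
--         raise ValueError("empty input")
--     if n_words < 1:
--         raise ValueError("n_words must be >= 1")
--     if len(hex_input) % 2:
--         hex_input = f"0{hex_input}"
--     try:
--         data = bytes.fromhex(hex_input)
--     except ValueError as exc:
--         raise ValueError("input must be hex") from exc
--     if not data:
--         raise ValueError("empty input")
--
--     seg_size = max(len(data) // n_words, 1)
--     acc = [0] * n_words
--     for i, b in enumerate(data):
--         acc[min(i // seg_size, n_words - 1)] ^= b
--     return "-".join(DICT[a] for a in acc)
-- ===== Notes on version B (the rewrite author's own statement) =====
-- stated objective: alternative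
-- what changed: Replaces the per-segment outer loop with inner slice-XOR passes by a single forward scatter pass over enumerate(data) that XORs each byte into its word's accumulator (remainder bytes clamped into the last word).
import Mathlib
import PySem

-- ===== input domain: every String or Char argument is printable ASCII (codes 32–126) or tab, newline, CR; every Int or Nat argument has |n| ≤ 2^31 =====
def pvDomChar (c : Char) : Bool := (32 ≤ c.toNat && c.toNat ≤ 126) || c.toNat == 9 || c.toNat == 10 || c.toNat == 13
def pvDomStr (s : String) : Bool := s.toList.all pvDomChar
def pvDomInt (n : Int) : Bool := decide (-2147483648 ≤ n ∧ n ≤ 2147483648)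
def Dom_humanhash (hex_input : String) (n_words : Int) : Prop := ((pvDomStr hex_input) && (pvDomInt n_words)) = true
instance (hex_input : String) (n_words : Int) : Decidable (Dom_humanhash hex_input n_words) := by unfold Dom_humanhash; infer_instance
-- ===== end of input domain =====

-- B replaces A's per-segment slice-XOR loops by one forward scatter pass over the bytes; equal return value on Pre_ (where A does not raise).


-- ===== PORT A =====
-- shared module constant: DICT = "...".split()
def DICT : List String := PySem.Str.split₀ "ack alabama alanine alaska alpha angel apart april arizona arkansas artist asparagus aspen august autumn avocado bacon bakerloo batman beer berlin beryllium black blossom blue bluebird bravo bulldog burger butter california carbon cardinal carolina carpet cat ceiling cello center charlie chicken coffee cola cold colorado comet connecticut crazy cup dakota december delaware delta diet don double early earth east echo edward eight eighteen eleven emma enemy equal failed fanta fillet finch fish five fix floor florida football four fourteen foxtrot freddie friend fruit gee georgia glucose golf green grey hamper happy harry hawaii helium high hot hotel hydrogen idaho illinois india indigo ink iowa island item jersey jig johnny juliet july jupiter kansas kentucky kilo king kitten lactose lake lamp lemon leopard lima lion lithium london louisiana low magazine magnesium maine mango march mars maryland massachusetts may mexico michigan mike minnesota mirror missouri mobile mockingbird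 monkey montana moon mountain muppet music nebraska neptune network nevada nine nineteen nitrogen north november nuts october ohio oklahoma one orange oranges oregon oscar oven oxygen papa paris pasta pennsylvania pip pizza pluto potato princess purple quebec queen quiet red river robert robin romeo rugby sad salami saturn september seven seventeen shade sierra single sink six sixteen skylark snake social sodium solar south spaghetti speaker spring stairway steak stream summer sweet table tango ten tennessee tennis texas thirteen three timing triple twelve twenty two uncle undress uniform uranus utah vegan venus vermont victor video violet virginia washington west whiskey white william winner winter wisconsin wolfram wyoming xray yankee yellow zebra zulu"

-- shared: hex digit value (exact: bytes.fromhex accepts 0-9 a-f A-F)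
def hexVal? (c : Char) : Option Nat :=
  if '0' ≤ c ∧ c ≤ '9' then some (c.toNat - 48)
  else if 'a' ≤ c ∧ c ≤ 'f' then some (c.toNat - 87)
  else if 'A' ≤ c ∧ c ≤ 'F' then some (c.toNat - 55)
  else none

-- shared: is this character ASCII whitespace (skipped by bytes.fromhex between byte pairs)?
def wsChar (c : Char) : Bool := c == ' ' || c == '\t' || c == '\n' || c == '\r' || c.toNat == 11 || c.toNat == 12

-- shared: bytes.fromhex, exact on the ASCII domain: whitespace is skipped only at
-- byte boundaries; each byte is two adjacent hex digits; none = ValueError (CPython 3.11 rule).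
def fromhex? : List Char → Option (List Nat)
  | [] => some []
  | c :: rest =>
    if wsChar c then fromhex? rest
    else
      match rest with
      | [] => none
      | d :: rest2 =>
        match hexVal? c, hexVal? d with
        | some a, some b => (fromhex? rest2).map (fun l => (a * 16 + b) :: l)
        | _, _ => none

-- shared: the odd-length zero padding (len(hex_input) % 2 then "0" + hex_input)
def paddedChars (hex_input : String) : List Char :=
  if hex_input.toList.length % 2 = 1 then '0' :: hex_input.toList else hex_input.toList

-- Port of A. On the paths where the Python raises ValueError, the port returns "" (excluded by Pre_).
-- body of A after the guards and hex parsing succeeded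
def humanhashCore (data : List Nat) (n_words : Int) : String :=
  if data = [] then ""                      -- raise ValueError("empty input")
  else
    let len : Int := (data.length : Int)
    let seg_size : Int := max (PySem.Int.floordiv len n_words) 1
    let words : List String :=
      (PySem.List.pyRange 0 n_words 1).foldl (fun ws seg =>
        let start := seg * seg_size
        let stop := if seg = n_words - 1 then len else start + seg_size
        let acc : Nat := (PySem.List.slice data (some start) (some stop)).foldl (fun a v => a ^^^ v) 0
        -- DICT[acc]: acc is a XOR of bytes, so 0 ≤ acc < 256 = len(DICT); in range
        ws ++ [PySem.List.pyGetD DICT (Int.ofNat acc) ""]) []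
    PySem.Str.join "-" words

def humanhash (hex_input : String) (n_words : Int) : String :=
  if hex_input.toList = [] then ""          -- raise ValueError("empty input")
  else if n_words < 1 then ""               -- raise ValueError("n_words must be >= 1")
  else
    match fromhex? (paddedChars hex_input) with
    | none => ""                            -- raise ValueError("input must be hex")
    | some data => humanhashCore data n_words

-- ===== PORT B =====
-- body of B after the guards and hex parsing succeeded
def humanhashAltCore (data : List Nat) (n_words : Int) : String :=
  if data = [] then ""                      -- raise ValueError("empty input")
  else
    let n : Nat := n_words.toNat
    let s : Nat := max (data.length / n) 1
    -- for i, b in enumerate(data): acc[min(i//seg_size, n_words-1)] ^= b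
    -- (enumerate ported as zipIdx: indices start at 0 and stay non-negative, exact)
    let acc : List Nat :=
      data.zipIdx.foldl (fun acc bi =>
        let j := min (bi.2 / s) (n - 1)
        acc.set j (acc.getD j 0 ^^^ bi.1)) (List.replicate n 0)
    PySem.Str.join "-" (acc.map (fun a => PySem.List.pyGetD DICT (Int.ofNat a) ""))

def humanhash_alt (hex_input : String) (n_words : Int) : String :=
  if hex_input.toList = [] then ""          -- raise ValueError("empty input")
  else if n_words < 1 then ""               -- raise ValueError("n_words must be >= 1")
  else
    match fromhex? (paddedChars hex_input) with
    | none => ""                            -- raise ValueError("input must be hex")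
    | some data => humanhashAltCore data n_words

-- ===== PRECONDITION & SPEC =====
-- Pre_: exactly where the Python A returns (no ValueError): non-empty input, n_words >= 1,
-- and the zero-padded input is a well-shaped hex byte string with at least one digit.
-- shape predicate: a sequence of two-adjacent-hex-digit bytes separated by ASCII whitespace
def isHexBytes : List Char → Bool
  | [] => true
  | c :: rest =>
    if wsChar c then isHexBytes rest
    else
      match rest with
      | [] => false
      | d :: rest2 =>
        match hexVal? c, hexVal? d with
        | some _, some _ => isHexBytes rest2
        | _, _ => false

def Pre_humanhash (hex_input : String) (n_words : Int) : Prop :=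
  hex_input.toList ≠ [] ∧ 1 ≤ n_words ∧ isHexBytes (paddedChars hex_input) = true
    ∧ (paddedChars hex_input).any (fun c => !wsChar c) = true

instance (hex_input : String) (n_words : Int) : Decidable (Pre_humanhash hex_input n_words) := by
  unfold Pre_humanhash; infer_instance

def pvWitness_humanhash : String × Int := ("7f3a9b", 2)

def Spec_humanhash (hex_input : String) (n_words : Int) (out : String) : Prop := out = humanhash_alt hex_input n_words
instance (hex_input : String) (n_words : Int) (out : String) : Decidable (Spec_humanhash hex_input n_words out) := by unfold Spec_humanhash; infer_instance

-- ===== CLAIM (what is proved, stated in full; the proofs are below) =====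
def Claim_equal_humanhash : Prop := ∀ (hex_input : String) (n_words : Int), Dom_humanhash hex_input n_words → Pre_humanhash hex_input n_words → Spec_humanhash hex_input n_words (humanhash hex_input n_words)

-- ===== LEMMAS AND PROOFS =====

-- the word index a byte at position i is scattered into by B
def segIdx (s n i : Nat) : Nat := min (i / s) (n - 1)

-- XOR of the elements of l (at absolute positions k, k+1, ...) whose position scatters to word j
def segXor (s n j : Nat) : List Nat → Nat → Nat
  | [], _ => 0
  | b :: t, k => (if segIdx s n k = j then b else 0) ^^^ segXor s n j t (k + 1)

-- a well-shaped hex string parses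
lemma fromhex?_isSome (cs : List Char) (h : isHexBytes cs = true) : (fromhex? cs).isSome := by
  fun_induction isHexBytes cs with
  | case1 => simp [fromhex?]
  | case2 c rest hws ih =>
    rw [fromhex?.eq_def]
    simp only [hws, if_true]
    exact ih h
  | case3 c hws => simp at h
  | case4 c hws d rest2 a b hvd hvc ih =>
    rw [fromhex?.eq_def]
    simp only [hws, if_false, hvc, hvd, Bool.false_eq_true, Option.isSome_map]
    exact ih h
  | case5 c hws d rest2 hno => simp at h

-- the parsed byte string is empty iff the input is all whitespace
lemma fromhex?_nil_iff (cs : List Char) (data : List Nat) (h : fromhex? cs = some data) :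
    data = [] ↔ cs.all wsChar = true := by
  fun_induction fromhex? cs generalizing data with
  | case1 =>
    have : data = [] := by simpa using h.symm
    simp [this]
  | case2 c rest hws ih =>
    simp [hws, ih data h]
  | case3 c hws => simp at h
  | case4 c hws d rest2 a b hvd hvc ih =>
    simp only [Option.map_eq_some_iff] at h
    obtain ⟨l, hl, hd⟩ := h
    simp [← hd, hws]
  | case5 c hws d rest2 hno => simp at h

-- XOR of all elements of a list, as A's inner loop computes it
def xorAll (l : List Nat) : Nat := l.foldl (fun a v => a ^^^ v) 0

lemma foldl_xor (l : List Nat) : ∀ c : Nat, l.foldl (fun a v => a ^^^ v) c = c ^^^ xorAll l := by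
  induction l with
  | nil => intro c; simp [xorAll]
  | cons b t ih =>
    intro c
    rw [List.foldl_cons, xorAll, List.foldl_cons, ih, ih]
    simp [Nat.zero_xor, Nat.xor_assoc]

lemma xorAll_cons (b : Nat) (t : List Nat) : xorAll (b :: t) = b ^^^ xorAll t := by
  simpa [xorAll] using foldl_xor t b

lemma segXor_append (s n j : Nat) (u v : List Nat) : ∀ k,
    segXor s n j (u ++ v) k = segXor s n j u k ^^^ segXor s n j v (k + u.length) := by
  induction u with
  | nil => intro k; simp [segXor]
  | cons b t ih =>
    intro k
    simp only [List.cons_append, segXor, ih (k + 1), List.length_cons, Nat.xor_assoc]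
    ring_nf

lemma segXor_eq_zero (s n j : Nat) (l : List Nat) : ∀ k,
    (∀ i, i < l.length → segIdx s n (k + i) ≠ j) → segXor s n j l k = 0 := by
  induction l with
  | nil => intro k _; simp [segXor]
  | cons b t ih =>
    intro k h
    have h0 : segIdx s n k ≠ j := by simpa using h 0 (by simp)
    rw [segXor, if_neg h0, Nat.zero_xor]
    exact ih (k + 1) (fun i hi => by
      have h' := h (i + 1) (by simpa using Nat.succ_lt_succ hi)
      rw [show k + 1 + i = k + (i + 1) by omega]
      exact h')

lemma segXor_eq_xorAll (s n j : Nat) (l : List Nat) : ∀ k,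
    (∀ i, i < l.length → segIdx s n (k + i) = j) → segXor s n j l k = xorAll l := by
  induction l with
  | nil => intro k _; simp [segXor, xorAll]
  | cons b t ih =>
    intro k h
    have h0 : segIdx s n k = j := by simpa using h 0 (by simp)
    rw [segXor, if_pos h0, xorAll_cons]
    congr 1
    exact ih (k + 1) (fun i hi => by
      have h' := h (i + 1) (by simpa using Nat.succ_lt_succ hi)
      rw [show k + 1 + i = k + (i + 1) by omega]
      exact h')

-- length of B's fold is the accumulator's length
lemma scatter_length (s n : Nat) (l : List Nat) : ∀ (k : Nat) (acc : List Nat),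
    ((l.zipIdx k).foldl (fun acc bi =>
        acc.set (min (bi.2 / s) (n - 1)) (acc.getD (min (bi.2 / s) (n - 1)) 0 ^^^ bi.1)) acc).length
      = acc.length := by
  induction l with
  | nil => intro k acc; simp
  | cons b t ih =>
    intro k acc
    rw [List.zipIdx_cons, List.foldl_cons, ih]
    simp

-- B's scatter fold, read back at index j: the accumulator XORed with the scattered bytes for j
lemma scatter_getD (s n : Nat) (l : List Nat) : ∀ (k : Nat) (acc : List Nat), acc.length = n →
    ∀ j, j < n →
    ((l.zipIdx k).foldl (fun acc bi =>
        acc.set (min (bi.2 / s) (n - 1)) (acc.getD (min (bi.2 / s) (n - 1)) 0 ^^^ bi.1)) acc).getD j 0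
      = acc.getD j 0 ^^^ segXor s n j l k := by
  induction l with
  | nil => intro k acc _ j _; simp [segXor]
  | cons b t ih =>
    intro k acc hlen j hj
    rw [List.zipIdx_cons, List.foldl_cons]
    have hstep : ∀ m, (acc.set (min (k / s) (n - 1)) m).length = n := by simp [hlen]
    rw [ih (k + 1) _ (hstep _) j hj]
    rw [segXor]
    have hget : (acc.set (min (k / s) (n - 1)) (acc.getD (min (k / s) (n - 1)) 0 ^^^ b)).getD j 0
        = acc.getD j 0 ^^^ (if segIdx s n k = j then b else 0) := by
      rw [List.getD_eq_getElem?_getD, List.getElem?_set, segIdx]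
      by_cases he : min (k / s) (n - 1) = j
      · rw [if_pos he, if_pos (by omega : min (k / s) (n - 1) < acc.length), if_pos he, he,
          Option.getD_some, List.getD_eq_getElem?_getD]
      · rw [if_neg he, if_neg he, Nat.xor_zero, List.getD_eq_getElem?_getD]
    rw [hget, Nat.xor_assoc]

-- B's final accumulator list in closed form
lemma accB_eq (s n : Nat) (data : List Nat) (hn : 0 < n) :
    (data.zipIdx.foldl (fun acc bi =>
        acc.set (min (bi.2 / s) (n - 1)) (acc.getD (min (bi.2 / s) (n - 1)) 0 ^^^ bi.1))
        (List.replicate n 0))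
      = (List.range n).map (fun j => segXor s n j data 0) := by
  apply List.ext_getElem
  · rw [scatter_length]; simp
  · intro j h1 h2
    have hj : j < n := by simpa using h2
    have hlen : ((data.zipIdx.foldl (fun acc bi =>
        acc.set (min (bi.2 / s) (n - 1)) (acc.getD (min (bi.2 / s) (n - 1)) 0 ^^^ bi.1))
        (List.replicate n 0))).length = n := by rw [scatter_length]; simp
    have hg := scatter_getD s n data 0 (List.replicate n 0) (by simp) j hj
    rw [List.getD_eq_getElem?_getD] at hg
    rw [List.getElem?_eq_getElem h1] at hg
    simp only [Option.getD_some] at hg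
    rw [hg]
    simp [List.getD_eq_getElem?_getD, hj]

-- A's segment XOR for word j equals B's scattered XOR for word j
lemma word_eq (data : List Nat) (s n j : Nat) (hs : 0 < s) (_hn : 0 < n) (hj : j < n) :
    xorAll (if j = n - 1 then data.drop (j * s) else (data.drop (j * s)).take s)
      = segXor s n j data 0 := by
  by_cases hlast : j = n - 1
  · rw [if_pos hlast]
    conv_rhs => rw [← List.take_append_drop (j * s) data]
    rw [segXor_append]
    rw [segXor_eq_zero s n j _ 0 (by
      intro i hi
      rw [List.length_take] at hi
      have hilt : i < j * s := by omega
      have hdiv : i / s < j := (Nat.div_lt_iff_lt_mul hs).mpr hilt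
      rw [segIdx, Nat.zero_add]
      have : min (i / s) (n - 1) = i / s := Nat.min_eq_left (by omega)
      omega)]
    rw [segXor_eq_xorAll s n j _ _ (by
      intro i hi
      rw [List.length_drop] at hi
      have hfl : (data.take (j * s)).length = j * s := by
        rw [List.length_take]; omega
      rw [hfl, segIdx, Nat.zero_add]
      have hle : j ≤ (j * s + i) / s := (Nat.le_div_iff_mul_le hs).mpr (Nat.le_add_right _ _)
      omega)]
    rw [Nat.zero_xor]
  · rw [if_neg hlast]
    have hj' : j < n - 1 := by omega
    conv_rhs => rw [← List.take_append_drop (j * s) data,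
                    ← List.take_append_drop s (data.drop (j * s))]
    rw [segXor_append, segXor_append]
    rw [segXor_eq_zero s n j (data.take (j * s)) 0 (by
      intro i hi
      rw [List.length_take] at hi
      have hilt : i < j * s := by omega
      have hdiv : i / s < j := (Nat.div_lt_iff_lt_mul hs).mpr hilt
      rw [segIdx, Nat.zero_add]
      omega)]
    rw [segXor_eq_xorAll s n j ((data.drop (j * s)).take s) _ (by
      intro i hi
      rw [List.length_take, List.length_drop] at hi
      have his : i < s := by omega
      have hjsL : j * s < data.length := by omega
      have hfl : (data.take (j * s)).length = j * s := by
        rw [List.length_take]; omega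
      rw [hfl, segIdx, Nat.zero_add]
      have hle : j ≤ (j * s + i) / s := (Nat.le_div_iff_mul_le hs).mpr (Nat.le_add_right _ _)
      have hlt : (j * s + i) / s < j + 1 := by
        apply (Nat.div_lt_iff_lt_mul hs).mpr
        calc j * s + i < j * s + s := by omega
        _ = (j + 1) * s := by ring
      omega)]
    rw [segXor_eq_zero s n j ((data.drop (j * s)).drop s) _ (by
      intro i hi
      rw [List.length_drop, List.length_drop] at hi
      have hL : j * s + s + i < data.length := by omega
      have hfl : (data.take (j * s)).length = j * s := by
        rw [List.length_take]; omega
      have hml : ((data.drop (j * s)).take s).length = s := by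
        rw [List.length_take, List.length_drop]; omega
      rw [hfl, hml, segIdx, Nat.zero_add]
      have hle : j + 1 ≤ (j * s + s + i) / s := by
        apply (Nat.le_div_iff_mul_le hs).mpr
        calc (j + 1) * s = j * s + s := by ring
        _ ≤ j * s + s + i := by omega
      omega)]
    simp

lemma word_eq' (data : List Nat) (s n j : Nat) (hs : 0 < s) (hn : 0 < n) (hj : j < n) :
    List.foldl (fun a v => a ^^^ v) 0
        (if j = n - 1 then data.drop (j * s) else (data.drop (j * s)).take s)
      = segXor s n j data 0 :=
  word_eq data s n j hs hn hj

-- core equality after both ports have parsed the same byte string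
lemma core_eq (data : List Nat) (n_words : Int) (h2 : 1 ≤ n_words) :
    ((PySem.List.pyRange 0 n_words 1).foldl (fun ws seg =>
        ws ++ [PySem.List.pyGetD DICT
          (Int.ofNat ((PySem.List.slice data (some (seg * max (PySem.Int.floordiv (data.length : Int) n_words) 1))
              (some (if seg = n_words - 1 then (data.length : Int)
                     else seg * max (PySem.Int.floordiv (data.length : Int) n_words) 1
                          + max (PySem.Int.floordiv (data.length : Int) n_words) 1))).foldl
            (fun a v => a ^^^ v) (0 : Nat))) ""]) [])
    = ((data.zipIdx.foldl (fun acc bi =>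
          acc.set (min (bi.2 / max (data.length / n_words.toNat) 1) (n_words.toNat - 1))
            (acc.getD (min (bi.2 / max (data.length / n_words.toNat) 1) (n_words.toNat - 1)) 0 ^^^ bi.1))
          (List.replicate n_words.toNat 0)).map (fun a => PySem.List.pyGetD DICT (Int.ofNat a) "")) := by
  set n : Nat := n_words.toNat with hn_def
  have hnw : n_words = (n : Int) := by omega
  have hn1 : 0 < n := by omega
  set s : Nat := max (data.length / n) 1 with hsdef
  have hs : 0 < s := by omega
  have hS : max (PySem.Int.floordiv (data.length : Int) n_words) 1 = (s : Int) := by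
    rw [hnw, PySem.Int.floordiv_natCast, hsdef]
    push_cast
    rfl
  rw [hS, accB_eq s n data hn1, List.map_map]
  rw [PySem.List.foldl_append_singleton_eq_map, List.nil_append]
  rw [PySem.List.pyRange_one, List.map_map]
  have hrange : (n_words - 0).toNat = n := by omega
  rw [hrange]
  apply List.map_congr_left
  intro k hk
  have hkn : k < n := List.mem_range.mp hk
  rw [Function.comp_apply, Function.comp_apply]
  have hmul : ((0 : Int) + (k : Int)) * (s : Int) = (((k * s : Nat)) : Int) := by push_cast; ring
  have hsliceval :
      PySem.List.slice data (some (((0 : Int) + (k : Int)) * (s : Int)))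
        (some (if (0 : Int) + (k : Int) = n_words - 1 then (data.length : Int)
               else ((0 : Int) + (k : Int)) * (s : Int) + (s : Int)))
      = (if k = n - 1 then data.drop (k * s) else (data.drop (k * s)).take s) := by
    by_cases hkl : k = n - 1
    · have hc : (0 : Int) + (k : Int) = n_words - 1 := by omega
      rw [if_pos hc, if_pos hkl, hmul, PySem.List.slice_natCast]
      apply List.take_of_length_le
      rw [List.length_drop]
    · have hc : ¬ ((0 : Int) + (k : Int) = n_words - 1) := by omega
      have hstop : (((k * s : Nat)) : Int) + (s : Int) = (((k * s + s : Nat)) : Int) := by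
        push_cast; ring
      rw [if_neg hc, if_neg hkl, hmul, hstop, PySem.List.slice_natCast, Nat.add_sub_cancel_left]
  rw [hsliceval, word_eq' data s n k hs hn1 hkn]

-- the two core bodies agree once the guards passed
lemma core2 (data : List Nat) (n_words : Int) (h2 : 1 ≤ n_words) (h3 : data ≠ []) :
    humanhashCore data n_words = humanhashAltCore data n_words := by
  rw [humanhashCore, humanhashAltCore, if_neg h3, if_neg h3]
  exact congrArg (fun w => PySem.Str.join "-" w) (core_eq data n_words h2)

theorem humanhash_spec : Claim_equal_humanhash := by
  intro hex_input n_words _hdom hpre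
  obtain ⟨h1, h2, hhex, hany⟩ := hpre
  obtain ⟨data, hfh⟩ := Option.isSome_iff_exists.mp (fromhex?_isSome _ hhex)
  have h3 : data ≠ [] := by
    intro hde
    have hall := (fromhex?_nil_iff _ _ hfh).mp hde
    rw [List.any_eq_true] at hany
    obtain ⟨c, hc, hcw⟩ := hany
    rw [List.all_eq_true] at hall
    have := hall c hc
    simp [this] at hcw
  show humanhash hex_input n_words = humanhash_alt hex_input n_words
  rw [humanhash, humanhash_alt]
  rw [if_neg h1, if_neg h1, if_neg (by omega : ¬ n_words < 1), if_neg (by omega : ¬ n_words < 1), hfh]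
  show humanhashCore data n_words = humanhashAltCore data n_words
  exact core2 data n_words h2 h3
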